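-- pv_equiv track=rewrite | github.com/zyzfred/BU-CS-521 | HW6/Function-cmd_mid.py | cmd_mid
-- ===== SOURCE A (Python) =====
-- def cmd_mid(x, pos):
--
--   if len(x) != 0 and len(x) != 1:
--     # split to lines
--     l = x.split('\n')
--
--     sum_size = 0
--     for i in range(len(l)):
--       sum_size += len(l[i])
--
--     remain = sum_size // 2
--     line_number = 0
--     end_line_count = 0
--
--     while remain - len(l[line_number]) > 0:
--       remain -= len(l[line_number])
--       end_line_count += 1
--       line_number += 1
--
--     pos = sum_size // 2 + end_line_count
--
--     return x, pos
--   else: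
--     return x, pos
-- ===== SOURCE B (Python) =====
-- def cmd_mid(x, pos):
--   if len(x) != 0 and len(x) != 1:
--     sum_size = len(x) - x.count('\n')
--     m = sum_size // 2
--     c = 0
--     line_counter = 0
--     for ch in x:
--       if ch == '\n':
--         if c < m:
--           line_counter += 1
--         else:
--           break
--       else:
--         c += 1
--     return x, m + line_counter
--   else:
--     return x, pos
-- ===== Notes on version B (the rewrite author's own statement) =====
-- stated objective: simpler
-- what changed: B drops the split/list entirely: it computes the non-newline total as len(x)-x.count('\n') and finds the number of whole lines before the midpoint by one character scan with a running counter, instead of building x.split('\n'), summing line lengths with an index loop and walking the line list with a second while loop.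
import Mathlib
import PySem

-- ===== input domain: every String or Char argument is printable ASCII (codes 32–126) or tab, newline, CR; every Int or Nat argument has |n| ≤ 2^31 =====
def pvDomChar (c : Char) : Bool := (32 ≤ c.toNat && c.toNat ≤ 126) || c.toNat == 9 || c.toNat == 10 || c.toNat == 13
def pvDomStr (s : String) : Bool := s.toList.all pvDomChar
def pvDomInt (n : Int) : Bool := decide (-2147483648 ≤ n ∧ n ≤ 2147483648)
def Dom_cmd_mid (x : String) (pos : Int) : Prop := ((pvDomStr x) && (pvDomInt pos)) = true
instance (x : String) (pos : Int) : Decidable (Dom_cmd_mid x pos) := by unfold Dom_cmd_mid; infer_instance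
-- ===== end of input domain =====

-- B replaces A's split-into-lines + length-sum loop + while-walk over the line list by a single
-- character scan with a running non-newline counter (same return value everywhere; no mutation).

-- ===== PORT A =====
-- A's while loop over the split lines; the [] case is unreachable from cmd_mid (in Python it would
-- be an IndexError, but remain never exceeds the total length of the remaining lines).
def cmdMidWhile : List (List Char) → Int → Int → Int
  | [], _, cnt => cnt
  | s :: rest, remain, cnt =>
    if remain - PySem.Chars.len s > 0 then
      cmdMidWhile rest (remain - PySem.Chars.len s) (cnt + 1)
    else cnt

def cmd_mid (x : String) (pos : Int) : String × Int :=
  if PySem.Str.len x ≠ 0 ∧ PySem.Str.len x ≠ 1 then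
    -- x.split('\n'): the separator is the non-empty literal '\n', so split is total;
    -- PySem.Chars.splitOn is exactly its meaning (PySem.Str.split? = some ∘ it for sep ≠ "").
    let l := PySem.Chars.splitOn x.toList ['\n']
    -- for i in range(len(l)): sum_size += len(l[i])
    let sum_size :=
      (PySem.List.pyRange 0 (l.length : Int) 1).foldl
        (fun acc i => acc + PySem.Chars.len (PySem.List.pyGetD l i [])) 0
    let end_line_count := cmdMidWhile l (PySem.Int.floordiv sum_size 2) 0
    (x, PySem.Int.floordiv sum_size 2 + end_line_count)
  else (x, pos)

-- ===== PORT B =====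
-- B's for-loop over the characters: c counts non-newline chars seen, line counts newlines passed
-- while c < m; 'break' at the first newline with c ≥ m.
def cmdMidScan : List Char → Int → Int → Int → Int
  | [], _, _, line => line
  | ch :: rest, m, c, line =>
    if ch = '\n' then
      (if c < m then cmdMidScan rest m c (line + 1) else line)
    else cmdMidScan rest m (c + 1) line

def cmd_mid_alt (x : String) (pos : Int) : String × Int :=
  if PySem.Str.len x ≠ 0 ∧ PySem.Str.len x ≠ 1 then
    let sumSize := PySem.Str.len x - (PySem.Str.count x "\n" : Int)
    let m := PySem.Int.floordiv sumSize 2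
    (x, m + cmdMidScan x.toList m 0 0)
  else (x, pos)

-- ===== PRECONDITION & SPEC =====
def Spec_cmd_mid (x : String) (pos : Int) (out : String × Int) : Prop := out = cmd_mid_alt x pos
instance (x : String) (pos : Int) (out : String × Int) : Decidable (Spec_cmd_mid x pos out) := by unfold Spec_cmd_mid; infer_instance

-- ===== CLAIM (what is proved, stated in full; the proofs are below) =====
def Claim_equal_cmd_mid : Prop := ∀ (x : String) (pos : Int), Dom_cmd_mid x pos → Spec_cmd_mid x pos (cmd_mid x pos)

-- ===== LEMMAS AND PROOFS =====

-- Reference single-char split on '\n' (proof-side only).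
def splitNl : List Char → List (List Char)
  | [] => [[]]
  | c :: rest =>
    if c = '\n' then [] :: splitNl rest
    else (c :: (splitNl rest).headI) :: (splitNl rest).tail

theorem splitNl_shape (cs : List Char) : splitNl cs = (splitNl cs).headI :: (splitNl cs).tail := by
  cases cs with
  | nil => simp [splitNl]
  | cons c rest => by_cases hc : c = '\n' <;> simp [splitNl, hc]

theorem splitOn_go_eq (fuel : Nat) (cs cur : List Char) (acc : List (List Char))
    (h : cs.length < fuel) :
    PySem.Chars.splitOn.go ['\n'] fuel cs cur acc =
      acc.reverse ++ (cur.reverse ++ (splitNl cs).headI) :: (splitNl cs).tail := by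
  induction fuel generalizing cs cur acc with
  | zero => omega
  | succ f ih =>
    cases cs with
    | nil => simp [PySem.Chars.splitOn.go, splitNl]
    | cons c rest =>
      by_cases hc : c = '\n'
      · subst hc
        have hpre : List.isPrefixOf ['\n'] ('\n' :: rest) = true := by
          simp [List.isPrefixOf]
        rw [PySem.Chars.splitOn.go]
        simp only [hpre, if_true, List.length_cons, List.length_nil, List.length_singleton,
          List.drop_succ_cons, List.drop_zero, Nat.zero_add] at *
        rw [ih rest [] ((List.reverse cur) :: acc) (by omega)]
        simp [splitNl, ← splitNl_shape]
      · have hpre : List.isPrefixOf ['\n'] (c :: rest) = false := by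
          simp [List.isPrefixOf]
          intro hx; exact absurd hx.symm hc
        rw [PySem.Chars.splitOn.go]
        simp only [hpre, Bool.false_eq_true, if_false]
        rw [ih rest (c :: cur) acc (by simpa using Nat.lt_of_succ_lt_succ h)]
        simp [splitNl, hc]

theorem splitOn_eq_splitNl (cs : List Char) :
    PySem.Chars.splitOn cs ['\n'] = splitNl cs := by
  unfold PySem.Chars.splitOn
  rw [splitOn_go_eq (cs.length + 1) cs [] [] (by omega)]
  simp [← splitNl_shape]

theorem count_go_eq (fuel : Nat) (cs : List Char) (acc : Nat) (h : cs.length ≤ fuel) :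
    PySem.Chars.count.go ['\n'] fuel cs acc = acc + cs.count '\n' := by
  induction fuel generalizing cs acc with
  | zero =>
    have : cs = [] := List.length_eq_zero_iff.mp (Nat.le_zero.mp h)
    subst this; simp [PySem.Chars.count.go]
  | succ f ih =>
    cases cs with
    | nil => simp [PySem.Chars.count.go]
    | cons c rest =>
      by_cases hc : c = '\n'
      · subst hc
        have hpre : List.isPrefixOf ['\n'] ('\n' :: rest) = true := by
          simp [List.isPrefixOf]
        rw [PySem.Chars.count.go]
        simp only [hpre, if_true, List.drop_succ_cons, List.drop_zero, List.length_singleton]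
        rw [ih rest (acc + 1) (by simpa using Nat.le_of_succ_le_succ h)]
        simp [List.count_cons]
        omega
      · have hpre : List.isPrefixOf ['\n'] (c :: rest) = false := by
          simp [List.isPrefixOf]
          intro hx; exact absurd hx.symm hc
        rw [PySem.Chars.count.go]
        simp only [hpre, Bool.false_eq_true, if_false]
        rw [ih rest acc (by simpa using Nat.le_of_succ_le_succ h)]
        simp [List.count_cons, hc]

theorem count_eq_listCount (cs : List Char) :
    PySem.Chars.count cs ['\n'] = cs.count '\n' := by
  unfold PySem.Chars.count
  simp [count_go_eq cs.length cs 0 (le_refl _)]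

theorem sum_lens_splitNl (cs : List Char) :
    ((splitNl cs).map PySem.Chars.len).sum = (cs.length : Int) - cs.count '\n' := by
  induction cs with
  | nil => simp [splitNl]
  | cons c rest ih =>
    by_cases hc : c = '\n'
    · subst hc
      simp [splitNl, ih, List.count_cons]
    · rw [show splitNl (c :: rest) =
          (c :: (splitNl rest).headI) :: (splitNl rest).tail by simp [splitNl, hc]]
      rw [splitNl_shape rest] at ih
      simp [List.count_cons, hc] at ih ⊢
      push_cast at ih ⊢
      omega

-- prepending a non-newline char to the first line shifts the remaining budget by one
theorem while_shift (a : Char) (h : List Char) (t : List (List Char)) (r line : Int) :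
    cmdMidWhile ((a :: h) :: t) r line = cmdMidWhile (h :: t) (r - 1) line := by
  simp only [cmdMidWhile, PySem.Chars.len_eq, List.length_cons]
  have hiff : (r - ((h.length : Int) + 1) > 0) ↔ (r - 1 - (h.length : Int) > 0) := by
    push_cast; omega
  by_cases hcond : r - ((h.length : Int) + 1) > 0
  · rw [if_pos (by push_cast at hcond ⊢; omega), if_pos (hiff.mp hcond)]
    congr 1
    push_cast; ring
  · rw [if_neg (by push_cast at hcond ⊢; omega), if_neg (fun hx => hcond (hiff.mpr hx))]

theorem scan_eq_while (cs : List Char) (m c line : Int)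
    (h : m - c ≤ (cs.length : Int) - cs.count '\n') :
    cmdMidScan cs m c line = cmdMidWhile (splitNl cs) (m - c) line := by
  induction cs generalizing c line with
  | nil =>
    simp only [splitNl, cmdMidScan, cmdMidWhile, PySem.Chars.len_eq]
    rw [if_neg]
    simp at h
    push_cast
    omega
  | cons c0 rest ih =>
    by_cases hc : c0 = '\n'
    · subst hc
      have hscan : cmdMidScan ('\n' :: rest) m c line =
          if c < m then cmdMidScan rest m c (line + 1) else line := by
        simp [cmdMidScan]
      have hsplit : splitNl ('\n' :: rest) = [] :: splitNl rest := by simp [splitNl]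
      have hwhile : cmdMidWhile ([] :: splitNl rest) (m - c) line =
          if c < m then cmdMidWhile (splitNl rest) (m - c) (line + 1) else line := by
        simp only [cmdMidWhile, PySem.Chars.len_eq, List.length_nil]
        by_cases hlt : c < m
        · rw [if_pos (by push_cast; omega), if_pos hlt]; norm_num
        · rw [if_neg (by push_cast; omega), if_neg hlt]
      rw [hscan, hsplit, hwhile]
      by_cases hlt : c < m
      · rw [if_pos hlt, if_pos hlt,
            ih c (line + 1) (by simp [List.count_cons] at h ⊢; push_cast at h ⊢; omega)]
      · rw [if_neg hlt, if_neg hlt]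
    · rw [show splitNl (c0 :: rest) =
          (c0 :: (splitNl rest).headI) :: (splitNl rest).tail by simp [splitNl, hc]]
      rw [splitNl_shape rest] at *
      rw [while_shift]
      rw [show cmdMidScan (c0 :: rest) m c line = cmdMidScan rest m (c + 1) line by
        simp [cmdMidScan, hc]]
      rw [ih (c + 1) line (by simp [List.count_cons, hc] at h ⊢; push_cast at h ⊢; omega)]
      congr 1
      ring

theorem newline_toList : ("\n" : String).toList = ['\n'] := rfl

-- ===== VERDICT (by name: the statement is the Claim_ definition above) =====
theorem cmd_mid_spec : Claim_equal_cmd_mid := by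
  intro x pos _
  unfold Spec_cmd_mid cmd_mid cmd_mid_alt
  by_cases hg : PySem.Str.len x ≠ 0 ∧ PySem.Str.len x ≠ 1
  · rw [if_pos hg, if_pos hg]
    simp only
    -- both midpoints are the same value
    have hsumA :
        (PySem.List.pyRange 0 ((PySem.Chars.splitOn x.toList ['\n']).length : Int) 1).foldl
          (fun acc i => acc + PySem.Chars.len
            (PySem.List.pyGetD (PySem.Chars.splitOn x.toList ['\n']) i [])) 0
        = (x.toList.length : Int) - x.toList.count '\n' := by
      rw [PySem.List.foldl_pyRange_zero_pyGetD' (PySem.Chars.splitOn x.toList ['\n']) []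
            (fun acc s => acc + PySem.Chars.len s) 0,
          PySem.List.foldl_add]
      rw [splitOn_eq_splitNl, sum_lens_splitNl]
      ring
    have hsumB : PySem.Str.len x - (PySem.Str.count x "\n" : Int)
        = (x.toList.length : Int) - x.toList.count '\n' := by
      rw [PySem.Str.len_eq, PySem.Str.count_eq, newline_toList, count_eq_listCount]
    rw [hsumA, hsumB]
    set S : Int := (x.toList.length : Int) - x.toList.count '\n' with hS
    have hS0 : 0 ≤ S := by
      have := List.count_le_length (l := x.toList) (a := '\n')
      rw [hS]; push_cast; omega
    have hM : PySem.Int.floordiv S 2 ≤ S := by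
      rw [PySem.Int.floordiv_eq_ediv_of_pos (by omega)]
      exact Int.ediv_le_self 2 hS0
    rw [splitOn_eq_splitNl]
    rw [show cmdMidWhile (splitNl x.toList) (PySem.Int.floordiv S 2) 0
          = cmdMidWhile (splitNl x.toList) (PySem.Int.floordiv S 2 - 0) 0 by norm_num]
    rw [← scan_eq_while x.toList (PySem.Int.floordiv S 2) 0 0 (by omega)]
  · rw [if_neg hg, if_neg hg]
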